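-- pv_equiv track=rewrite | github.com/jluke13/CS5525_HW1 | HW1_Q7.py | create_snippets
-- ===== SOURCE A (Python) =====
-- punctuation = [".","!","?"]
--
-- def create_snippets(text, l) :
--     snippets = []
--     current_sentence = 0
--     current_snippet = []
--     for w in text :
--         if w in punctuation :
--             current_sentence = current_sentence + 1
--             if current_sentence == l :
--                 snippets.append(current_snippet)
--                 current_snippet = []
--                 current_sentence = 0
--         else :
--             current_snippet.append(w)
--     return snippets
-- ===== SOURCE B (Python) =====
-- punctuation = [".","!","?"]
--
-- def create_snippets(text, l):
--     # pass 1: split into completed sentences (terminators dropped, trailing partial dropped)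
--     sentences = []
--     cur = []
--     for w in text:
--         if w in punctuation:
--             sentences.append(cur)
--             cur = []
--         else:
--             cur.append(w)
--     if l <= 0:
--         return []
--     # pass 2: take full groups of l sentences, flatten each into one snippet
--     result = []
--     while l <= len(sentences):
--         result.append([w for s in sentences[:l] for w in s])
--         sentences = sentences[l:]
--     return result
-- ===== Notes on version B (the rewrite author's own statement) =====
-- stated objective: alternative
-- what changed: Replaces A's single stateful loop (snippet accumulator plus modular sentence counter) with two passes: first split the words into completed sentences, then flatten each full group of l sentences into a snippet.
import Mathlib
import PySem

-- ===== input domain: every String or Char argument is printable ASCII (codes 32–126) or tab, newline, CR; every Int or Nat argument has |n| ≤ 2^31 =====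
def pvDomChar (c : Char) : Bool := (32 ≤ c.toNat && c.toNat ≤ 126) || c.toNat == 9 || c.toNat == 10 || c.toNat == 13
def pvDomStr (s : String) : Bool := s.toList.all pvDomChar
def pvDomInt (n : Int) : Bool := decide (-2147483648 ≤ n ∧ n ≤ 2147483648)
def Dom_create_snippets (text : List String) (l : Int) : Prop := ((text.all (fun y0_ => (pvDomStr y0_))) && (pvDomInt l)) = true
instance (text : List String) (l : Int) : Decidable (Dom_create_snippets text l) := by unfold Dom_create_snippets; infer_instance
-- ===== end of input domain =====

-- B re-decomposes A's single stateful loop into two passes (split into completed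
-- sentences, then flatten full groups of l); equivalence of the return values is proved.

-- ===== PORT A =====
def punctuation : List String := [".", "!", "?"]

-- one iteration of A's for-loop over state (snippets, current_sentence, current_snippet)
def AStep (l : Int) (st : List (List String) × Int × List String) (w : String) :
    List (List String) × Int × List String :=
  if w ∈ punctuation then
    if st.2.1 + 1 == l then (st.1 ++ [st.2.2], 0, [])
    else (st.1, st.2.1 + 1, st.2.2)
  else (st.1, st.2.1, st.2.2 ++ [w])

def create_snippets (text : List String) (l : Int) : List (List String) :=
  (text.foldl (AStep l) ([], 0, [])).1

-- ===== PORT B =====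
-- pass 1: one iteration over state (sentences, cur)
def BStep (st : List (List String) × List String) (w : String) :
    List (List String) × List String :=
  if w ∈ punctuation then (st.1 ++ [st.2], [])
  else (st.1, st.2 ++ [w])

-- pass 2: the while-loop — take a full group of l sentences, flatten it, continue
def chunkConcat (l : Nat) (ss : List (List String)) : List (List String)  :=
  if _h : 0 < l ∧ l ≤ ss.length then
    (ss.take l).flatten :: chunkConcat l (ss.drop l)
  else []
termination_by ss.length
decreasing_by simp only [List.length_drop]; omega

def create_snippets_alt (text : List String) (l : Int) : List (List String) :=
  if l ≤ 0 then []
  else chunkConcat l.toNat (text.foldl BStep ([], [])).1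

-- ===== PRECONDITION & SPEC =====
def Spec_create_snippets (text : List String) (l : Int) (out : List (List String)) : Prop := out = create_snippets_alt text l
instance (text : List String) (l : Int) (out : List (List String)) : Decidable (Spec_create_snippets text l out) := by unfold Spec_create_snippets; infer_instance

-- ===== CLAIM (what is proved, stated in full; the proofs are below) =====
def Claim_equal_create_snippets : Prop := ∀ (text : List String) (l : Int), Dom_create_snippets text l → Spec_create_snippets text l (create_snippets text l)

-- ===== LEMMAS AND PROOFS =====

-- the completed sentences produced by the remaining words, given the current partial sentence
def sentsFrom (cur : List String) : List String → List (List String)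
  | [] => []
  | w :: ws => if w ∈ punctuation then cur :: sentsFrom [] ws else sentsFrom (cur ++ [w]) ws

-- grouping a sentence stream with a partially built snippet `cur` and `cs` sentences counted
def chunkW (l : Nat) (cur : List String) (cs : Nat) : List (List String) → List (List String)
  | [] => []
  | s :: rs =>
    if cs + 1 = l then (cur ++ s) :: chunkW l [] 0 rs
    else chunkW l (cur ++ s) (cs + 1) rs

theorem bfold_sents (ws : List String) (ss : List (List String)) (cur : List String) :
    (ws.foldl BStep (ss, cur)).1 = ss ++ sentsFrom cur ws := by
  induction ws generalizing ss cur with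
  | nil => simp [sentsFrom]
  | cons w ws ih =>
    by_cases h : w ∈ punctuation <;>
      simp [BStep, sentsFrom, h, ih]

theorem chunkW_shift (l : Nat) (rest : List String) :
    ∀ (p cur : List String) (cs : Nat),
      chunkW l cur cs (sentsFrom p rest) = chunkW l (cur ++ p) cs (sentsFrom [] rest) := by
  induction rest with
  | nil => intro p cur cs; simp [sentsFrom, chunkW]
  | cons w rs ih =>
    intro p cur cs
    by_cases h : w ∈ punctuation
    · simp only [sentsFrom, h, if_pos, chunkW]
      simp
    · simp only [sentsFrom, h, if_neg, not_false_iff, List.nil_append]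
      rw [ih (p ++ [w]) cur cs, ih [w] (cur ++ p) cs]
      simp
theorem afold_chunkW (l : Int) (hl : 0 < l) (ws : List String) :
    ∀ (sn : List (List String)) (cs : Nat) (cur : List String), (cs : Int) < l →
      (ws.foldl (AStep l) (sn, (cs : Int), cur)).1
        = sn ++ chunkW l.toNat cur cs (sentsFrom [] ws) := by
  induction ws with
  | nil => intro sn cs cur _; simp [sentsFrom, chunkW]
  | cons w rs ih =>
    intro sn cs cur hcs
    by_cases h : w ∈ punctuation
    · by_cases he : (cs : Int) + 1 = l
      · have hn : cs + 1 = l.toNat := by omega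
        have : ((cs : Int) + 1 == l) = true := by simpa using he
        simp only [List.foldl_cons, AStep, h, if_pos, this]
        have h0 : ((0 : Int)) = ((0 : Nat) : Int) := by norm_num
        rw [h0, ih (sn ++ [cur]) 0 [] (by omega)]
        simp [sentsFrom, h, chunkW, hn]
      · have hn : ¬ (cs + 1 = l.toNat) := by omega
        have : ((cs : Int) + 1 == l) = false := by simpa using he
        simp only [List.foldl_cons, AStep, h, if_pos, this, Bool.false_eq_true,
          if_false]
        have h1 : (cs : Int) + 1 = ((cs + 1 : Nat) : Int) := by push_cast; ring
        rw [h1, ih sn (cs + 1) cur (by omega)]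
        simp [sentsFrom, h, chunkW, hn]
    · simp only [List.foldl_cons, AStep, h, if_neg, not_false_iff]
      rw [ih sn cs (cur ++ [w]) hcs]
      simp only [sentsFrom, h, if_neg, not_false_iff, List.nil_append]
      rw [chunkW_shift l.toNat rs [w] cur cs]

theorem chunkW_chunkConcat (l : Nat) (hl : 0 < l) (ss : List (List String)) :
    ∀ (cur : List String) (cs : Nat), cs < l →
      chunkW l cur cs ss
        = if l - cs ≤ ss.length
          then (cur ++ (ss.take (l - cs)).flatten) :: chunkConcat l (ss.drop (l - cs))
          else [] := by
  induction ss with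
  | nil =>
    intro cur cs hcs
    simp only [chunkW, List.length_nil]
    rw [if_neg (by omega)]
  | cons s rs ih =>
    intro cur cs hcs
    by_cases he : cs + 1 = l
    · have h1 : l - cs = 1 := by omega
      rw [h1]
      simp only [chunkW, he, if_pos, List.take_succ_cons, List.take_zero,
        List.drop_succ_cons, List.drop_zero, List.flatten_cons, List.flatten_nil,
        List.append_nil, List.length_cons]
      rw [if_pos (by omega)]
      congr 1
      rw [ih [] 0 hl]
      simp only [Nat.sub_zero, List.nil_append]
      conv_rhs => rw [chunkConcat]
      by_cases h2 : l ≤ rs.length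
      · rw [if_pos h2, dif_pos ⟨hl, h2⟩]
      · rw [if_neg h2, dif_neg (by omega)]
    · have h1 : l - cs = (l - (cs + 1)) + 1 := by omega
      simp only [chunkW, he, if_neg, not_false_iff]
      rw [ih (cur ++ s) (cs + 1) (by omega)]
      have h2 : (l - cs ≤ (s :: rs).length) ↔ (l - (cs + 1) ≤ rs.length) := by
        simp [List.length_cons]; omega
      by_cases h3 : l - (cs + 1) ≤ rs.length
      · rw [if_pos h3, if_pos (h2.mpr h3), h1]
        simp [List.take_succ_cons, List.drop_succ_cons]
      · rw [if_neg h3, if_neg (fun hc => h3 (h2.mp hc))]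

-- ===== VERDICT (by name: the statement is the Claim_ definition above) =====
theorem create_snippets_spec : Claim_equal_create_snippets := by
  intro text l _
  unfold Spec_create_snippets create_snippets create_snippets_alt
  by_cases hl : l ≤ 0
  · rw [if_pos hl]
    -- with l ≤ 0 the test current_sentence + 1 == l never fires: snippets stays []
    have key : ∀ (ws : List String) (sn : List (List String)) (cs : Nat) (cur : List String),
        (ws.foldl (AStep l) (sn, (cs : Int), cur)).1 = sn := by
      intro ws
      induction ws with
      | nil => intro sn cs cur; simp
      | cons w rs ih =>
        intro sn cs cur
        by_cases h : w ∈ punctuation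
        · have : ((cs : Int) + 1 == l) = false := by
            simp only [beq_eq_false_iff_ne, ne_eq]
            omega
          have h1 : (cs : Int) + 1 = ((cs + 1 : Nat) : Int) := by push_cast; ring
          simp only [List.foldl_cons, AStep, h, if_pos, this, Bool.false_eq_true,
            if_false]
          rw [h1, ih sn (cs + 1) cur]
        · simp only [List.foldl_cons, AStep, h, if_neg, not_false_iff]
          exact ih sn cs (cur ++ [w])
    exact key text [] 0 []
  · have hl' : 0 < l := by omega
    rw [if_neg hl]
    have h0 : ((0 : Int)) = ((0 : Nat) : Int) := by norm_num
    rw [h0, afold_chunkW l hl' text [] 0 [] (by omega), bfold_sents text [] []]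
    rw [chunkW_chunkConcat l.toNat (by omega) (sentsFrom [] text) [] 0 (by omega)]
    simp only [Nat.sub_zero, List.nil_append]
    conv_rhs => rw [chunkConcat]
    by_cases h2 : l.toNat ≤ (sentsFrom [] text).length
    · rw [if_pos h2, dif_pos ⟨by omega, h2⟩]
    · rw [if_neg h2, dif_neg (by omega)]
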